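-- pv_equiv track=rewrite | github.com/tnotesjs/TNotes.leetcode | notes/2919. 使数组变美的最小增量运算数【中等】/solutions/1/1.py | minIncrementOperations
-- ===== SOURCE A (Python) =====
-- def minIncrementOperations(nums: list[int], k: int) -> int:
--     f0 = max(0, k - nums[0])
--     f1 = max(0, k - nums[1])
--     f2 = max(0, k - nums[2])
--     for i in range(3, len(nums)):
--         cost = max(0, k - nums[i])
--         f0, f1, f2 = f1, f2, cost + min(f0, f1, f2)
--     return min(f0, f1, f2)
-- ===== SOURCE B (Python) =====
-- def minIncrementOperations(nums: list[int], k: int) -> int: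
--     n = len(nums)
--     memo = {}
--
--     def dp(i):
--         if i in memo:
--             return memo[i]
--         cost = max(0, k - nums[i])
--         r = cost if i < 3 else cost + min(dp(i - 1), dp(i - 2), dp(i - 3))
--         memo[i] = r
--         return r
--
--     # warm the cache bottom-up so the recursion depth stays constant
--     for i in range(n):
--         dp(i)
--     return min(dp(n - 1), dp(n - 2), dp(n - 3))
-- ===== Notes on version B (the rewrite author's own statement) =====
-- stated objective: alternative
-- what changed: Replaces A's forward loop rolling three variables f0,f1,f2 with a top-down memoized recursion dp(i)=cost(i)+min(dp(i-1),dp(i-2),dp(i-3)), answering min(dp(n-1),dp(n-2),dp(n-3)).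
import Mathlib
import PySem

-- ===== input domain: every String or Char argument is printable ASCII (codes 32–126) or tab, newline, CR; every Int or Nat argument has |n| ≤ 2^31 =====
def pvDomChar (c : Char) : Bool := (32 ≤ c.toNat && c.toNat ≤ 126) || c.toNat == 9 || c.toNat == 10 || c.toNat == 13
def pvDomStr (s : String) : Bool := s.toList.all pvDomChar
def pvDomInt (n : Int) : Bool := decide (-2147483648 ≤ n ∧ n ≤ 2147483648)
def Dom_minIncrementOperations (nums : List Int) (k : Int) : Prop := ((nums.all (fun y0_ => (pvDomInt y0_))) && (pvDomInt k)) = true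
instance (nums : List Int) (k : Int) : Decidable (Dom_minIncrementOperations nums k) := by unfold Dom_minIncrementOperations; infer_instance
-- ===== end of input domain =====

-- B replaces A's forward loop over three rolling variables by a top-down (memoized in Python)
-- recursion on the index; equivalence of return values is proved for len(nums) ≥ 3.

-- ===== PORT A =====
def minIncrementOperations (nums : List Int) (k : Int) : Int :=
  let f0 := max 0 (k - PySem.List.pyGetD nums 0 0)
  let f1 := max 0 (k - PySem.List.pyGetD nums 1 0)
  let f2 := max 0 (k - PySem.List.pyGetD nums 2 0)
  let s := (PySem.List.pyRange 3 (nums.length : Int) 1).foldl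
    (fun (s : Int × Int × Int) i =>
      let cost := max 0 (k - PySem.List.pyGetD nums i 0)
      (s.2.1, s.2.2, cost + min s.1 (min s.2.1 s.2.2)))
    (f0, f1, f2)
  min s.1 (min s.2.1 s.2.2)

-- ===== PORT B =====
-- B's dp(i): cost(i) for i < 3, else cost(i) + min over the three predecessors, all read
-- from the memo dict; the cache-warming loop 'for i in range(n): dp(i)' fills memo in
-- increasing order, so each dp(i) call there IS one pvStep on the memo (every smaller
-- index is already cached), and the three final dp calls are pure memo hits (getD).
def pvStep (nums : List Int) (k : Int) (memo : PySem.Dict Int Int) (i : Int) : PySem.Dict Int Int :=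
  let cost := max 0 (k - PySem.List.pyGetD nums i 0)
  let r := if i < 3 then cost
           else cost + min (memo.getD (i-1) 0) (min (memo.getD (i-2) 0) (memo.getD (i-3) 0))
  memo.insert i r

def minIncrementOperations_alt (nums : List Int) (k : Int) : Int :=
  let n : Int := nums.length
  let memo := (PySem.List.pyRange 0 n 1).foldl (pvStep nums k) PySem.Dict.empty
  min (memo.getD (n-1) 0) (min (memo.getD (n-2) 0) (memo.getD (n-3) 0))

-- ===== PRECONDITION & SPEC =====
-- A raises IndexError (reads nums[0..2]) when len(nums) < 3; exactly those inputs are excluded.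
def Pre_minIncrementOperations (nums : List Int) (k : Int) : Prop := 3 ≤ nums.length
instance (nums : List Int) (k : Int) : Decidable (Pre_minIncrementOperations nums k) := by
  unfold Pre_minIncrementOperations; infer_instance

def pvWitness_minIncrementOperations : List Int × Int := ([1, 2, 3, 0], 4)

def Spec_minIncrementOperations (nums : List Int) (k : Int) (out : Int) : Prop := out = minIncrementOperations_alt nums k
instance (nums : List Int) (k : Int) (out : Int) : Decidable (Spec_minIncrementOperations nums k out) := by unfold Spec_minIncrementOperations; infer_instance

-- ===== CLAIM (what is proved, stated in full; the proofs are below) =====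
def Claim_equal_minIncrementOperations : Prop := ∀ (nums : List Int) (k : Int), Dom_minIncrementOperations nums k → Pre_minIncrementOperations nums k → Spec_minIncrementOperations nums k (minIncrementOperations nums k)

-- ===== LEMMAS AND PROOFS =====

-- Invariant: after processing indices < m, A's rolling triple (f0, f1, f2) is exactly
-- B's memo at keys m-3, m-2, m-1.
theorem pvInv (nums : List Int) (k : Int) :
    ∀ m : Nat, 3 ≤ m →
      ((PySem.List.pyRange 0 (m : Int) 1).foldl (pvStep nums k) PySem.Dict.empty).getD ((m : Int) - 3) 0
        = ((PySem.List.pyRange 3 (m : Int) 1).foldl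
            (fun (s : Int × Int × Int) i =>
              let cost := max 0 (k - PySem.List.pyGetD nums i 0)
              (s.2.1, s.2.2, cost + min s.1 (min s.2.1 s.2.2)))
            (max 0 (k - PySem.List.pyGetD nums 0 0), max 0 (k - PySem.List.pyGetD nums 1 0),
             max 0 (k - PySem.List.pyGetD nums 2 0))).1 ∧
      ((PySem.List.pyRange 0 (m : Int) 1).foldl (pvStep nums k) PySem.Dict.empty).getD ((m : Int) - 2) 0
        = ((PySem.List.pyRange 3 (m : Int) 1).foldl
            (fun (s : Int × Int × Int) i =>
              let cost := max 0 (k - PySem.List.pyGetD nums i 0)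
              (s.2.1, s.2.2, cost + min s.1 (min s.2.1 s.2.2)))
            (max 0 (k - PySem.List.pyGetD nums 0 0), max 0 (k - PySem.List.pyGetD nums 1 0),
             max 0 (k - PySem.List.pyGetD nums 2 0))).2.1 ∧
      ((PySem.List.pyRange 0 (m : Int) 1).foldl (pvStep nums k) PySem.Dict.empty).getD ((m : Int) - 1) 0
        = ((PySem.List.pyRange 3 (m : Int) 1).foldl
            (fun (s : Int × Int × Int) i =>
              let cost := max 0 (k - PySem.List.pyGetD nums i 0)
              (s.2.1, s.2.2, cost + min s.1 (min s.2.1 s.2.2)))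
            (max 0 (k - PySem.List.pyGetD nums 0 0), max 0 (k - PySem.List.pyGetD nums 1 0),
             max 0 (k - PySem.List.pyGetD nums 2 0))).2.2 := by
  intro m hm
  induction m with
  | zero => omega
  | succ m ih =>
    rcases Nat.lt_or_ge m 3 with h3 | h3
    · -- base: m + 1 = 3
      have hm2 : m = 2 := by omega
      subst hm2
      rw [show (((2:Nat) + 1 : Nat) : Int) = 3 by norm_num]
      rw [PySem.List.pyRange_one_eq_nil (a := 3) (b := 3) (by omega)]
      rw [show PySem.List.pyRange 0 3 1 = [0, 1, 2] from by decide]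
      simp only [List.foldl, pvStep, PySem.Dict.getD_insert, PySem.Dict.getD_empty]
      norm_num
    · -- step: m ≥ 3
      have hle0 : (0 : Int) ≤ (m : Int) := by positivity
      have hle3 : (3 : Int) ≤ (m : Int) := by exact_mod_cast h3
      have hcast : ((m + 1 : Nat) : Int) = (m : Int) + 1 := by push_cast; ring
      rw [hcast, PySem.List.pyRange_one_succ_right hle3,
          PySem.List.pyRange_one_succ_right (by omega : (0:Int) ≤ (m : Int)),
          List.foldl_append, List.foldl_append]
      obtain ⟨h1, h2, h3'⟩ := ih h3
      simp only [List.foldl, pvStep, PySem.Dict.getD_insert]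
      rw [if_neg (by omega : ¬ ((m : Int) + 1 - 3 = (m : Int))),
          if_neg (by omega : ¬ ((m : Int) + 1 - 2 = (m : Int))),
          if_pos (by omega : (m : Int) + 1 - 1 = (m : Int)),
          if_neg (by omega : ¬ ((m : Int) < 3))]
      rw [show (m : Int) + 1 - 3 = (m : Int) - 2 by ring,
          show (m : Int) + 1 - 2 = (m : Int) - 1 by ring]
      dsimp only at h1 h2 h3' ⊢
      refine ⟨h2, h3', ?_⟩
      rw [h1, h2, h3']
      omega

-- ===== VERDICT (by name: the statement is the Claim_ definition above) =====
theorem minIncrementOperations_spec : Claim_equal_minIncrementOperations := by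
  intro nums k _hdom hpre
  unfold Spec_minIncrementOperations minIncrementOperations minIncrementOperations_alt
  have hpre' : 3 ≤ nums.length := hpre
  obtain ⟨h1, h2, h3⟩ := pvInv nums k nums.length hpre'
  dsimp only at h1 h2 h3 ⊢
  rw [h1, h2, h3]
  omega
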